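-- pv_equiv track=rewrite | github.com/JD-TB1/Hyperbolic-RL-Feature-Selection | scripts/hyperbolic_enhanced.py | compute_top_branch
-- ===== SOURCE A (Python) =====
-- def compute_top_branch(nodes, parent_map, root_id="90"):
--     """
--     Determine each node's top-level branch.
--     root_id branch = itself ("root")
--     child of root → branch = itself
--     deeper nodes → use the ancestor which is direct child of root
--     """
--     top_branch = {}
--     for n in nodes:
--         cur = n
--         prev = None
--         # climb to root
--         while cur in parent_map:
--             prev = cur
--             cur = parent_map[cur]
--         # after loop:
--         # cur should be root or ancestor
--         if cur == root_id and prev is not None: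
--             top_branch[n] = prev  # direct child of root
--         else:
--             # for root itself
--             top_branch[n] = n
--     return top_branch
-- ===== SOURCE B (Python) =====
-- def compute_top_branch(nodes, parent_map, root_id="90"):
--     """Memoized top-branch computation: caches, per visited key, its ancestor that
--     is a direct child of root_id (or None if its chain does not end at root_id),
--     compressing each climbed path into the cache."""
--     cache = {}
--
--     def branch_of(x):
--         # x is a key of parent_map; returns its direct-child-of-root ancestor,
--         # or None if its parent chain does not end exactly at root_id.
--         path = []
--         while x not in cache:
--             p = parent_map[x]
--             if p in parent_map:
--                 path.append(x)
--                 x = p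
--             else:
--                 cache[x] = x if p == root_id else None
--                 break
--         res = cache[x]
--         for y in path:
--             cache[y] = res
--         return res
--
--     out = {}
--     for n in nodes:
--         b = branch_of(n) if n in parent_map else None
--         out[n] = n if b is None else b
--     return out
-- ===== Notes on version B (the rewrite author's own statement) =====
-- stated objective: alternative
-- what changed: B replaces A's per-node full climb to the root with a memoized climb that caches each visited key's top branch and path-compresses every climbed chain into the cache; it trades per-node rescanning of shared chain prefixes for cache bookkeeping.
import Mathlib
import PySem

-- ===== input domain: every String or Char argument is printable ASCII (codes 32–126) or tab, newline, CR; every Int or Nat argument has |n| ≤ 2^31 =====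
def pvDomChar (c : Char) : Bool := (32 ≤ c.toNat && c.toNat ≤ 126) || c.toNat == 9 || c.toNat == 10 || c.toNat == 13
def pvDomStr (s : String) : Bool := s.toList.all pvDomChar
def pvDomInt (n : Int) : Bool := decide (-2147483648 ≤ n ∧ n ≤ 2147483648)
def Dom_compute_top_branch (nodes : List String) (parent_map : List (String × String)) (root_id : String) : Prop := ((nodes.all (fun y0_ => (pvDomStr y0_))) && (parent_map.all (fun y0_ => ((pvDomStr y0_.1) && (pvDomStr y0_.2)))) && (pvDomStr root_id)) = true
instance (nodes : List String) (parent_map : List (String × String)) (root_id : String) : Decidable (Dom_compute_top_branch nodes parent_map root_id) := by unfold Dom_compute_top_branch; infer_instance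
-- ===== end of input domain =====

-- B replaces A's per-node full climb to the root with a memoized, path-compressing climb (a different algorithm; not measured faster on the benchmark inputs).

-- dict lookup (first match, as a Python dict represented as an association list)
def pvFindPM? (pm : List (String × String)) (x : String) : Option String :=
  (pm.find? (fun p => p.1 == x)).map (·.2)

-- ===== PORT A =====
-- the 'while cur in parent_map' climb; fuel pm.length+1 suffices on every input Pre_ admits
def climbA (pm : List (String × String)) : Nat → String → Option String → String × Option String
  | 0, cur, prev => (cur, prev)              -- fuel exhausted: only reachable outside Pre_
  | fuel+1, cur, prev =>
      match pvFindPM? pm cur with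
      | some p => climbA pm fuel p (some cur)
      | none => (cur, prev)

def compute_top_branch (nodes : List String) (parent_map : List (String × String)) (root_id : String) : List (String × String) :=
  (nodes.foldl (fun tb n =>
      let cp := climbA parent_map (parent_map.length + 1) n none
      if cp.1 == root_id && cp.2.isSome then tb.insert n (cp.2.getD n)
      else tb.insert n n) (PySem.Dict.empty : PySem.Dict String String)).items

-- ===== PORT B =====
-- the 'while x not in cache' climb of Source B: stops at a cache hit or at the last key of the
-- chain, then writes the result back into the cache for every node on the climbed path
def climbB (pm : List (String × String)) (root_id : String) :
    Nat → PySem.Dict String (Option String) → String → List String →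
    PySem.Dict String (Option String) × Option String
  | 0, cache, _, path =>                      -- fuel exhausted: only reachable outside Pre_
      (path.foldl (fun c y => c.insert y none) cache, none)
  | fuel+1, cache, x, path =>
      match cache.get? x with
      | some res => (path.foldl (fun c y => c.insert y res) cache, res)
      | none =>
        match pvFindPM? pm x with
        | none => (path.foldl (fun c y => c.insert y none) cache, none)  -- unreachable: x is always a key here
        | some p =>
          if (pvFindPM? pm p).isSome then
            climbB pm root_id fuel cache p (x :: path)
          else
            let res := if p == root_id then some x else none
            (path.foldl (fun c y => c.insert y res) (cache.insert x res), res)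

def compute_top_branch_alt (nodes : List String) (parent_map : List (String × String)) (root_id : String) : List (String × String) :=
  (nodes.foldl (fun (st : PySem.Dict String String × PySem.Dict String (Option String)) n =>
      if (pvFindPM? parent_map n).isSome then
        let cb := climbB parent_map root_id (parent_map.length + 1) st.2 n []
        (st.1.insert n (match cb.2 with | some v => v | none => n), cb.1)
      else
        (st.1.insert n n, st.2))
    ((PySem.Dict.empty : PySem.Dict String String), (PySem.Dict.empty : PySem.Dict String (Option String)))).1.items

-- ===== PRECONDITION & SPEC =====
-- one step up the tree (identity on ids that are not keys of parent_map)
def pvParent (pm : List (String × String)) (x : String) : String :=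
  (pvFindPM? pm x).getD x

-- Pre_ excludes exactly the inputs on which Python A never returns: some node's parent
-- chain enters a cycle, so A's 'while cur in parent_map' loop diverges. Equivalently
-- (closed form): from every listed node, the parent chain leaves the key set of
-- parent_map within parent_map.length steps.
def Pre_compute_top_branch (nodes : List String) (parent_map : List (String × String)) (root_id : String) : Prop :=
  ∀ n ∈ nodes, (pvFindPM? parent_map ((pvParent parent_map)^[parent_map.length] n)).isSome = false

instance (nodes : List String) (parent_map : List (String × String)) (root_id : String) : Decidable (Pre_compute_top_branch nodes parent_map root_id) := by unfold Pre_compute_top_branch; infer_instance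

def pvWitness_compute_top_branch : List String × (List (String × String)) × String :=
  (["a", "b", "c", "90"], [("a", "90"), ("b", "a"), ("c", "x")], "90")

def Spec_compute_top_branch (nodes : List String) (parent_map : List (String × String)) (root_id : String) (out : List (String × String)) : Prop := out = compute_top_branch_alt nodes parent_map root_id
instance (nodes : List String) (parent_map : List (String × String)) (root_id : String) (out : List (String × String)) : Decidable (Spec_compute_top_branch nodes parent_map root_id out) := by unfold Spec_compute_top_branch; infer_instance

-- ===== CLAIM (what is proved, stated in full; the proofs are below) =====
def Claim_equal_compute_top_branch : Prop := ∀ (nodes : List String) (parent_map : List (String × String)) (root_id : String), Dom_compute_top_branch nodes parent_map root_id → Pre_compute_top_branch nodes parent_map root_id → Spec_compute_top_branch nodes parent_map root_id (compute_top_branch nodes parent_map root_id)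

-- ===== LEMMAS AND PROOFS =====

-- the chain position after f climbing steps (stops once the current id is not a key)
def pvChase (pm : List (String × String)) : Nat → String → String
  | 0, x => x
  | f+1, x => match pvFindPM? pm x with
      | some p => pvChase pm f p
      | none => x

-- the last key on the chain before leaving the key set (A's final 'prev' for a key start)
def pvLast (pm : List (String × String)) : Nat → String → String
  | 0, x => x
  | f+1, x => match pvFindPM? pm x with
      | none => x
      | some p => if (pvFindPM? pm p).isSome then pvLast pm f p else x

-- chain spec with ample fuel
def pvTop (pm : List (String × String)) (x : String) : String := pvChase pm (pm.length + 1) x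
def pvLastV (pm : List (String × String)) (x : String) : String := pvLast pm (pm.length + 1) x
def pvTerm (pm : List (String × String)) (x : String) : Prop :=
  (pvFindPM? pm (pvChase pm (pm.length + 1) x)).isSome = false
-- the value Source B caches for a key x
def pvCVAL (pm : List (String × String)) (root : String) (x : String) : Option String :=
  if pvTop pm x == root then some (pvLastV pm x) else none
def pvInv (pm : List (String × String)) (root : String) (cache : PySem.Dict String (Option String)) : Prop :=
  ∀ k r, cache.get? k = some r →
    (pvFindPM? pm k).isSome = true ∧ pvTerm pm k ∧ r = pvCVAL pm root k

theorem pvWitness_ok :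
    Pre_compute_top_branch pvWitness_compute_top_branch.1 pvWitness_compute_top_branch.2.1 pvWitness_compute_top_branch.2.2 := by
  decide

-- one-step unfolding equations
theorem chase_key (pm : List (String × String)) (f : Nat) (x p : String)
    (hx : pvFindPM? pm x = some p) : pvChase pm (f+1) x = pvChase pm f p := by
  simp [pvChase, hx]

theorem chase_nokey (pm : List (String × String)) (f : Nat) (x : String)
    (hx : pvFindPM? pm x = none) : pvChase pm (f+1) x = x := by
  simp [pvChase, hx]

theorem last_key (pm : List (String × String)) (f : Nat) (x p : String)
    (hx : pvFindPM? pm x = some p) :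
    pvLast pm (f+1) x = if (pvFindPM? pm p).isSome then pvLast pm f p else x := by
  simp [pvLast, hx]

theorem last_nokey (pm : List (String × String)) (f : Nat) (x : String)
    (hx : pvFindPM? pm x = none) : pvLast pm (f+1) x = x := by
  simp [pvLast, hx]

theorem climbA_key (pm : List (String × String)) (f : Nat) (x p : String) (prev : Option String)
    (hx : pvFindPM? pm x = some p) : climbA pm (f+1) x prev = climbA pm f p (some x) := by
  simp [climbA, hx]

theorem climbA_nokey (pm : List (String × String)) (f : Nat) (x : String) (prev : Option String)
    (hx : pvFindPM? pm x = none) : climbA pm (f+1) x prev = (x, prev) := by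
  simp [climbA, hx]

theorem climbB_hit (pm : List (String × String)) (root : String) (f : Nat)
    (cache : PySem.Dict String (Option String)) (x : String) (path : List String)
    (res : Option String) (hc : cache.get? x = some res) :
    climbB pm root (f+1) cache x path = (path.foldl (fun c y => c.insert y res) cache, res) := by
  simp [climbB, hc]

theorem climbB_step (pm : List (String × String)) (root : String) (f : Nat)
    (cache : PySem.Dict String (Option String)) (x p : String) (path : List String)
    (hc : cache.get? x = none) (hx : pvFindPM? pm x = some p)
    (hp : (pvFindPM? pm p).isSome = true) :
    climbB pm root (f+1) cache x path = climbB pm root f cache p (x :: path) := by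
  simp [climbB, hc, hx, hp]

theorem climbB_base (pm : List (String × String)) (root : String) (f : Nat)
    (cache : PySem.Dict String (Option String)) (x p : String) (path : List String)
    (hc : cache.get? x = none) (hx : pvFindPM? pm x = some p)
    (hp : (pvFindPM? pm p).isSome = false) :
    climbB pm root (f+1) cache x path =
      (path.foldl (fun c y => c.insert y (if p == root then some x else none))
        (cache.insert x (if p == root then some x else none)),
       if p == root then some x else none) := by
  simp [climbB, hc, hx, hp]

theorem chase_notkey (pm : List (String × String)) (f : Nat) (x : String)
    (h : pvFindPM? pm x = none) : pvChase pm f x = x := by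
  cases f with
  | zero => rfl
  | succ f => exact chase_nokey pm f x h

theorem chase_eq_iterate (pm : List (String × String)) :
    ∀ (f : Nat) (x : String), pvChase pm f x = (pvParent pm)^[f] x := by
  intro f
  induction f with
  | zero => intro x; rfl
  | succ f ih =>
    intro x
    rw [Function.iterate_succ_apply]
    cases hx : pvFindPM? pm x with
    | none =>
      have hpx : pvParent pm x = x := by simp [pvParent, hx]
      rw [hpx, ← ih x, chase_notkey pm f x hx]
      exact chase_nokey pm f x hx
    | some p =>
      rw [chase_key pm f x p hx, ih p]
      have hpx : pvParent pm x = p := by simp [pvParent, hx]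
      rw [hpx]

theorem chase_last_fix (pm : List (String × String)) :
    ∀ (f : Nat) (x : String), (pvFindPM? pm (pvChase pm f x)).isSome = false →
      pvChase pm (f+1) x = pvChase pm f x ∧ pvLast pm (f+1) x = pvLast pm f x := by
  intro f
  induction f with
  | zero =>
    intro x h
    simp only [pvChase] at h
    cases hx : pvFindPM? pm x with
    | none => exact ⟨chase_nokey pm 0 x hx, last_nokey pm 0 x hx⟩
    | some p => rw [hx] at h; simp at h
  | succ f ih =>
    intro x h
    cases hx : pvFindPM? pm x with
    | none =>
      rw [chase_nokey pm (f+1) x hx, chase_nokey pm f x hx,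
        last_nokey pm (f+1) x hx, last_nokey pm f x hx]
      exact ⟨rfl, rfl⟩
    | some p =>
      have h' : (pvFindPM? pm (pvChase pm f p)).isSome = false := by
        rw [chase_key pm f x p hx] at h; exact h
      obtain ⟨h1, h2⟩ := ih p h'
      constructor
      · rw [chase_key pm (f+1) x p hx, chase_key pm f x p hx, h1]
      · rw [last_key pm (f+1) x p hx, last_key pm f x p hx, h2]

theorem chase_fix_ge (pm : List (String × String)) (f : Nat) (x : String)
    (h : (pvFindPM? pm (pvChase pm f x)).isSome = false) :
    ∀ g, f ≤ g → pvChase pm g x = pvChase pm f x ∧ pvLast pm g x = pvLast pm f x := by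
  intro g hle
  obtain ⟨d, rfl⟩ := Nat.exists_eq_add_of_le hle
  clear hle
  induction d with
  | zero => exact ⟨rfl, rfl⟩
  | succ d ih =>
    obtain ⟨h1, h2⟩ := ih
    have h' : (pvFindPM? pm (pvChase pm (f + d) x)).isSome = false := by rw [h1]; exact h
    obtain ⟨h1', h2'⟩ := chase_last_fix pm (f + d) x h'
    exact ⟨h1'.trans h1, h2'.trans h2⟩

theorem climbA_eq (pm : List (String × String)) :
    ∀ (f : Nat) (x : String) (prev : Option String),
      (pvFindPM? pm (pvChase pm f x)).isSome = false →
      climbA pm (f+1) x prev =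
        (pvChase pm f x,
          match pvFindPM? pm x with
          | none => prev
          | some _ => some (pvLast pm f x)) := by
  intro f
  induction f with
  | zero =>
    intro x prev h
    simp only [pvChase] at h
    cases hx : pvFindPM? pm x with
    | none => rw [climbA_nokey pm 0 x prev hx]; simp [pvChase]
    | some p => rw [hx] at h; simp at h
  | succ f ih =>
    intro x prev h
    cases hx : pvFindPM? pm x with
    | none =>
      rw [climbA_nokey pm (f+1) x prev hx, chase_notkey pm (f+1) x hx]
    | some p =>
      have h' : (pvFindPM? pm (pvChase pm f p)).isSome = false := by
        rw [chase_key pm f x p hx] at h; exact h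
      rw [climbA_key pm (f+1) x p prev hx, ih p (some x) h',
        chase_key pm f x p hx, last_key pm f x p hx]
      cases hp : pvFindPM? pm p with
      | none => simp
      | some q => simp

-- stepping along one parent edge preserves termination and the chain data
theorem step_all (pm : List (String × String)) (x p : String)
    (hx : pvFindPM? pm x = some p) (hT : pvTerm pm x) :
    pvTerm pm p ∧ pvTop pm x = pvTop pm p ∧
      pvLastV pm x = (if (pvFindPM? pm p).isSome then pvLastV pm p else x) := by
  have hch : pvChase pm (pm.length + 1) x = pvChase pm pm.length p :=
    chase_key pm pm.length x p hx
  have hp : (pvFindPM? pm (pvChase pm pm.length p)).isSome = false := by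
    rw [← hch]; exact hT
  obtain ⟨h1, h2⟩ := chase_fix_ge pm pm.length p hp (pm.length + 1) (Nat.le_succ _)
  refine ⟨?_, ?_, ?_⟩
  · unfold pvTerm; rw [h1]; exact hp
  · unfold pvTop; rw [hch, h1]
  · unfold pvLastV
    rw [last_key pm pm.length x p hx, h2]

theorem cval_step (pm : List (String × String)) (root x p : String)
    (hx : pvFindPM? pm x = some p) (hT : pvTerm pm x)
    (hp : (pvFindPM? pm p).isSome = true) :
    pvCVAL pm root x = pvCVAL pm root p := by
  obtain ⟨_, h1, h2⟩ := step_all pm x p hx hT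
  unfold pvCVAL
  rw [h1, h2, if_pos hp]

theorem cval_base (pm : List (String × String)) (root x p : String)
    (hx : pvFindPM? pm x = some p) (hT : pvTerm pm x)
    (hp : (pvFindPM? pm p).isSome = false) :
    pvCVAL pm root x = (if p == root then some x else none) := by
  obtain ⟨_, h1, h2⟩ := step_all pm x p hx hT
  have htp : pvTop pm p = p :=
    chase_notkey pm _ p (by simpa using hp)
  have hlx : pvLastV pm x = x := by rw [h2, if_neg (by simp [hp])]
  unfold pvCVAL
  rw [h1, htp, hlx]

theorem inv_insert (pm : List (String × String)) (root : String)
    (cache : PySem.Dict String (Option String)) (hInv : pvInv pm root cache)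
    (k : String) (hk : (pvFindPM? pm k).isSome = true) (hT : pvTerm pm k) :
    pvInv pm root (cache.insert k (pvCVAL pm root k)) := by
  intro k' r h
  rw [PySem.Dict.get?_insert] at h
  split_ifs at h with he
  · cases h; subst he; exact ⟨hk, hT, rfl⟩
  · exact hInv k' r h

theorem inv_fold (pm : List (String × String)) (root : String) (r : Option String) :
    ∀ (l : List String) (cache : PySem.Dict String (Option String)),
      pvInv pm root cache →
      (∀ y ∈ l, (pvFindPM? pm y).isSome = true ∧ pvTerm pm y ∧ pvCVAL pm root y = r) →
      pvInv pm root (l.foldl (fun c y => c.insert y r) cache) := by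
  intro l
  induction l with
  | nil => intro cache hInv _; exact hInv
  | cons y l ih =>
    intro cache hInv hl
    obtain ⟨hk, hT, hc⟩ := hl y (by simp)
    simp only [List.foldl_cons]
    exact ih _ (by rw [← hc]; exact inv_insert pm root cache hInv y hk hT)
      (fun z hz => hl z (by simp [hz]))

theorem climbB_main (pm : List (String × String)) (root : String) :
    ∀ (f : Nat) (x : String) (path : List String) (cache : PySem.Dict String (Option String)),
      pvInv pm root cache →
      (pvFindPM? pm x).isSome = true →
      (pvFindPM? pm (pvChase pm f x)).isSome = false →
      pvTerm pm x →
      (∀ y ∈ path, (pvFindPM? pm y).isSome = true ∧ pvTerm pm y ∧ pvCVAL pm root y = pvCVAL pm root x) →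
      (climbB pm root (f+1) cache x path).2 = pvCVAL pm root x ∧
        pvInv pm root (climbB pm root (f+1) cache x path).1 := by
  intro f
  induction f with
  | zero =>
    intro x path cache hInv hkey hch hT hpath
    simp only [pvChase] at hch
    rw [hch] at hkey; cases hkey
  | succ f ih =>
    intro x path cache hInv hkey hch hT hpath
    cases hc : cache.get? x with
    | some res =>
      obtain ⟨_, _, hres⟩ := hInv x res hc
      subst hres
      rw [climbB_hit pm root (f+1) cache x path _ hc]
      exact ⟨rfl, inv_fold pm root _ path cache hInv hpath⟩
    | none =>
      cases hx : pvFindPM? pm x with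
      | none => rw [hx] at hkey; cases hkey
      | some p =>
        cases hp : (pvFindPM? pm p).isSome with
        | true =>
          have hch' : (pvFindPM? pm (pvChase pm f p)).isSome = false := by
            rw [chase_key pm f x p hx] at hch; exact hch
          obtain ⟨hTp, _, _⟩ := step_all pm x p hx hT
          have hcv := cval_step pm root x p hx hT hp
          have hrec := ih p (x :: path) cache hInv hp hch' hTp
            (by
              intro y hy
              rcases List.mem_cons.mp hy with rfl | hy'
              · exact ⟨hkey, hT, hcv⟩
              · obtain ⟨a, b, c⟩ := hpath y hy'
                exact ⟨a, b, by rw [c, hcv]⟩)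
          rw [climbB_step pm root (f+1) cache x p path hc hx hp, hcv]
          exact hrec
        | false =>
          have hcv := cval_base pm root x p hx hT hp
          rw [climbB_base pm root (f+1) cache x p path hc hx hp]
          refine ⟨hcv.symm, ?_⟩
          have h1 : pvInv pm root (cache.insert x (pvCVAL pm root x)) :=
            inv_insert pm root cache hInv x hkey hT
          rw [hcv] at h1
          exact inv_fold pm root _ path _ h1
            (fun y hy => by
              obtain ⟨a, b, c⟩ := hpath y hy
              exact ⟨a, b, by rw [c, hcv]⟩)

-- the value A stores for node n, expressed through the chain spec
theorem A_step_val (pm : List (String × String)) (root n : String)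
    (hn : (pvFindPM? pm (pvChase pm pm.length n)).isSome = false)
    (tb : PySem.Dict String String) :
    (let cp := climbA pm (pm.length + 1) n none
     if cp.1 == root && cp.2.isSome then tb.insert n (cp.2.getD n) else tb.insert n n) =
    tb.insert n (if (pvFindPM? pm n).isSome then
        (match pvCVAL pm root n with | some v => v | none => n) else n) := by
  obtain ⟨h1, h2⟩ := chase_fix_ge pm pm.length n hn (pm.length + 1) (Nat.le_succ _)
  have hA := climbA_eq pm pm.length n none hn
  cases hx : pvFindPM? pm n with
  | none =>
    rw [hx] at hA
    simp only [hA, chase_notkey pm pm.length n hx]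
    simp
  | some p =>
    rw [hx] at hA
    simp only [hA]
    have hcv : pvCVAL pm root n =
        (if pvChase pm pm.length n == root then some (pvLast pm pm.length n) else none) := by
      unfold pvCVAL pvTop pvLastV
      rw [h1, h2]
    cases hr : (pvChase pm pm.length n == root) with
    | true => simp [hcv, hr]
    | false => simp [hcv, hr]

theorem fold_eq (pm : List (String × String)) (root : String) :
    ∀ (l : List String) (tb : PySem.Dict String String)
      (cache : PySem.Dict String (Option String)),
      pvInv pm root cache →
      (∀ n ∈ l, (pvFindPM? pm (pvChase pm pm.length n)).isSome = false) →
      l.foldl (fun tb n =>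
          let cp := climbA pm (pm.length + 1) n none
          if cp.1 == root && cp.2.isSome then tb.insert n (cp.2.getD n) else tb.insert n n) tb =
      (l.foldl (fun (st : PySem.Dict String String × PySem.Dict String (Option String)) n =>
          if (pvFindPM? pm n).isSome then
            let cb := climbB pm root (pm.length + 1) st.2 n []
            (st.1.insert n (match cb.2 with | some v => v | none => n), cb.1)
          else (st.1.insert n n, st.2)) (tb, cache)).1 := by
  intro l
  induction l with
  | nil => intro tb cache _ _; rfl
  | cons n l ih =>
    intro tb cache hInv hl
    have hn := hl n (by simp)
    have hT : pvTerm pm n := by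
      unfold pvTerm
      rw [(chase_fix_ge pm pm.length n hn (pm.length + 1) (Nat.le_succ _)).1]
      exact hn
    simp only [List.foldl_cons]
    rw [A_step_val pm root n hn tb]
    cases hx : (pvFindPM? pm n).isSome with
    | false =>
      simp only [Bool.false_eq_true, if_false]
      exact ih _ cache hInv (fun m hm => hl m (by simp [hm]))
    | true =>
      obtain ⟨hv, hInv'⟩ := climbB_main pm root pm.length n [] cache hInv hx hn hT (by simp)
      simp only [if_true]
      rw [hv]
      exact ih _ _ hInv' (fun m hm => hl m (by simp [hm]))

-- ===== VERDICT (by name: the statement is the Claim_ definition above) =====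
theorem compute_top_branch_spec : Claim_equal_compute_top_branch := by
  intro nodes pm root _ hPre
  unfold Spec_compute_top_branch compute_top_branch compute_top_branch_alt
  rw [fold_eq pm root nodes PySem.Dict.empty PySem.Dict.empty
    (fun k r h => by simp [PySem.Dict.get?_empty] at h)
    (fun n hn => by rw [chase_eq_iterate]; exact hPre n hn)]
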